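-- pv_equiv track=rewrite | github.com/jin8/cs170-mlst | src/findMaxLeafTree.py | findMaxLeafTree
-- ===== SOURCE A (Python) =====
-- def findMaxLeafTree(graph):
--     newGraph = {}
--     numEdgeForEachVertex = {}
--     vertices =[k for k,v in graph.items()]
--
--     for x in vertices:
--         if len(graph[x]) not in numEdgeForEachVertex:
--             numEdgeForEachVertex[len(graph[x])]= list()
--         numEdgeForEachVertex[len(graph[x])].append(x)
--
--     while vertices:
--         edges = numEdgeForEachVertex.keys()
--         maxEdge = max(edges)
--         for x in numEdgeForEachVertex[maxEdge]:
--             for y in graph[x]: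
--                 if y in vertices:
--                     if x not in newGraph:
--                         newGraph[x] = list()
--                     if y not in newGraph[x]:
--                         newGraph[x].append(y)
--                     if y not in newGraph:
--                         newGraph[y] = list()
--                     if x not in newGraph[y]:
--                         newGraph[y].append(x)
--                     if y in vertices:
--                         vertices.remove(y)
--                 if x in vertices:
--                     vertices.remove(x)
--         del numEdgeForEachVertex[maxEdge]
--     return newGraph
-- ===== SOURCE B (Python) =====
-- def findMaxLeafTree(graph):
--     newGraph = {}
--     remaining = set(graph)
--     order = sorted(graph, key=lambda x: -len(graph[x]))
--     for x in order:
--         for y in graph[x]: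
--             if y in remaining:
--                 if x not in newGraph:
--                     newGraph[x] = list()
--                 if y not in newGraph[x]:
--                     newGraph[x].append(y)
--                 if y not in newGraph:
--                     newGraph[y] = list()
--                 if x not in newGraph[y]:
--                     newGraph[y].append(x)
--                 remaining.discard(y)
--             if x in remaining:
--                 remaining.remove(x)
--     return newGraph
-- ===== Notes on version B (the rewrite author's own statement) =====
-- stated objective: faster
-- what changed: A's degree-bucket dict (numEdgeForEachVertex) and its `while vertices: max(edges) ... del` selection loop are replaced by one stable descending-degree sort (sorted(graph, key=lambda x: -len(graph[x]))) plus a `remaining` set; the inner edge-adding pass over graph[x] is unchanged.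
-- crash fix: On graphs that contain a vertex with an empty adjacency list which appears in no other vertex's adjacency list, A raises ValueError (max() of an empty sequence) after exhausting the buckets; B simply leaves such vertices out and returns the tree built from the rest. — e.g. on findMaxLeafTree([(0, []), (1, [2]), (2, [1])]): A raises ValueError, B returns [(1, [2]), (2, [1])]
import Mathlib
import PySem

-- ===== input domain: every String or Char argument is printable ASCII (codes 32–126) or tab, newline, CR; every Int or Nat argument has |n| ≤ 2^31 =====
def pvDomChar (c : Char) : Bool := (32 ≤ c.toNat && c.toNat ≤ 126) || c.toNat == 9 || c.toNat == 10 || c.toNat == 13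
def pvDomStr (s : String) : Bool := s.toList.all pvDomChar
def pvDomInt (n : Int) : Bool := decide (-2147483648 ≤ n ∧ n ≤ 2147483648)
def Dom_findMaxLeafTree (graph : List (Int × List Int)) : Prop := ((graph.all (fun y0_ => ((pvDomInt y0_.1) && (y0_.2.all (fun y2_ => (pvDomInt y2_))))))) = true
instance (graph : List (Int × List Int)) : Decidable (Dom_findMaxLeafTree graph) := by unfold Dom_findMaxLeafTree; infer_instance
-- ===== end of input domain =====

-- B replaces A's degree-bucket dict and its `while vertices: max(...)` selection loop by one
-- stable descending-degree sort plus a `remaining` set (objective: faster, measured by the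
-- timing run; the inner edge-adding pass is unchanged).

-- shared lookup helper: Python's graph[x] on the dict argument
def pvAdj (graph : List (Int × List Int)) (x : Int) : List Int :=
  (PySem.Dict.mk graph).getD x []

-- len(graph[x])
def pvDeg (graph : List (Int × List Int)) (x : Int) : Int :=
  PySem.List.len (pvAdj graph x)

-- ===== PORT A =====
-- the four newGraph-updating lines, identical in A's and B's inner loop body
def pvAddEdge (x y : Int) (ng : PySem.Dict Int (List Int)) : PySem.Dict Int (List Int) :=
  let ng := if ng.contains x then ng else ng.insert x []
  let ng := if (ng.getD x []).contains y then ng else ng.modify x [] (fun l => l ++ [y])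
  let ng := if ng.contains y then ng else ng.insert y []
  if (ng.getD y []).contains x then ng else ng.modify y [] (fun l => l ++ [x])

-- body of `for y in graph[x]:` (A keeps `vertices` as a Python LIST: `y in vertices`, list.remove)
def pvBodyA (x : Int) (st : PySem.Dict Int (List Int) × List Int) (y : Int) :
    PySem.Dict Int (List Int) × List Int :=
  let st :=
    if st.2.contains y then
      (pvAddEdge x y st.1, if st.2.contains y then (PySem.List.remove? st.2 y).getD st.2 else st.2)
    else st
  if st.2.contains x then (st.1, (PySem.List.remove? st.2 x).getD st.2) else st

-- `for y in graph[x]: …` for one vertex x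
def pvStepA (graph : List (Int × List Int)) (st : PySem.Dict Int (List Int) × List Int)
    (x : Int) : PySem.Dict Int (List Int) × List Int :=
  (pvAdj graph x).foldl (pvBodyA x) st

-- the numEdgeForEachVertex bucket dict
def pvBucketsA (graph : List (Int × List Int)) : PySem.Dict Int (List Int) :=
  (graph.map Prod.fst).foldl (fun d x =>
    let d := if d.contains (pvDeg graph x) then d else d.insert (pvDeg graph x) []
    d.modify (pvDeg graph x) [] (fun l => l ++ [x])) PySem.Dict.empty

-- `while vertices: maxEdge = max(edges); …; del numEdgeForEachVertex[maxEdge]`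
def pvLoopA (graph : List (Int × List Int)) (buckets : PySem.Dict Int (List Int))
    (ng : PySem.Dict Int (List Int)) (vertices : List Int) : PySem.Dict Int (List Int) :=
  if vertices.isEmpty then ng
  else
    match h : PySem.List.max? buckets.keys (fun k => k) with
    | none => ng  -- Python: max(()) raises ValueError here — these inputs are outside Pre_
    | some m =>
      let st := (buckets.getD m []).foldl (fun st x => pvStepA graph st x) (ng, vertices)
      pvLoopA graph (buckets.erase m) st.1 st.2
termination_by buckets.items.length
decreasing_by
  have hm : m ∈ buckets.keys := PySem.List.max?_mem h
  simp only [PySem.Dict.keys, List.mem_map] at hm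
  obtain ⟨p, hp, hpm⟩ := hm
  simp only [PySem.Dict.erase]
  exact List.length_filter_lt_length_iff_exists.mpr ⟨p, hp, by simp [hpm]⟩

def findMaxLeafTree (graph : List (Int × List Int)) : List (Int × List Int) :=
  let vertices := graph.map Prod.fst
  (pvLoopA graph (pvBucketsA graph) PySem.Dict.empty vertices).items

-- ===== PORT B =====
-- the same inner body, but over B's `remaining` SET (set membership, set.discard, set.remove)
def pvBodyB (x : Int) (st : PySem.Dict Int (List Int) × PySem.Set Int) (y : Int) :
    PySem.Dict Int (List Int) × PySem.Set Int :=
  let st :=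
    if PySem.Set.contains st.2 y then (pvAddEdge x y st.1, PySem.Set.discard st.2 y) else st
  if PySem.Set.contains st.2 x then (st.1, (PySem.Set.remove? st.2 x).getD st.2) else st

def pvStepB (graph : List (Int × List Int)) (st : PySem.Dict Int (List Int) × PySem.Set Int)
    (x : Int) : PySem.Dict Int (List Int) × PySem.Set Int :=
  (pvAdj graph x).foldl (pvBodyB x) st

def findMaxLeafTree_alt (graph : List (Int × List Int)) : List (Int × List Int) :=
  let order := PySem.List.sorted (graph.map Prod.fst) (fun x => -(pvDeg graph x))
  let st := order.foldl (fun st x => pvStepB graph st x)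
    (PySem.Dict.empty, PySem.Set.ofList (graph.map Prod.fst))
  st.1.items

-- ===== PRECONDITION & SPEC =====
-- Pre_ excludes (a) association lists with duplicate keys, which a Python dict cannot present
-- (the list is the dict's encoding), and (b) graphs that have a vertex with an empty adjacency
-- list which occurs in no other adjacency list: on exactly those Python A raises ValueError
-- (max() of empty sequence), see Raises_ below.
def Pre_findMaxLeafTree (graph : List (Int × List Int)) : Prop :=
  (graph.map Prod.fst).Nodup ∧
    ∀ p ∈ graph, p.2 ≠ [] ∨ p.1 ∈ (graph.map Prod.snd).flatten
instance (graph : List (Int × List Int)) : Decidable (Pre_findMaxLeafTree graph) := by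
  unfold Pre_findMaxLeafTree; infer_instance

def pvWitness_findMaxLeafTree : (List (Int × List Int)) :=
  [(1, [2, 3]), (2, [1]), (3, [1])]

-- On graphs with a vertex whose adjacency list is empty and which appears in no adjacency list,
-- Python A raises ValueError (max() of an empty sequence); B returns the spanning forest of the
-- remaining graph, simply leaving such vertices out.
def Raises_findMaxLeafTree (graph : List (Int × List Int)) : Prop :=
  (graph.map Prod.fst).Nodup ∧
    ∃ p ∈ graph, p.2 = [] ∧ p.1 ∉ (graph.map Prod.snd).flatten
instance (graph : List (Int × List Int)) : Decidable (Raises_findMaxLeafTree graph) := by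
  unfold Raises_findMaxLeafTree; infer_instance

def pvRaiseWitness_findMaxLeafTree : (List (Int × List Int)) :=
  [(0, []), (1, [2]), (2, [1])]

def pvRaiseWitnessOut_findMaxLeafTree : List (Int × List Int) :=
  [(1, [2]), (2, [1])]

def Spec_findMaxLeafTree (graph : List (Int × List Int)) (out : List (Int × List Int)) : Prop :=
  out = findMaxLeafTree_alt graph
instance (graph : List (Int × List Int)) (out : List (Int × List Int)) :
    Decidable (Spec_findMaxLeafTree graph out) := by
  unfold Spec_findMaxLeafTree; infer_instance

-- ===== CLAIM (what is proved, stated in full; the proofs are below) =====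
def Claim_equal_findMaxLeafTree : Prop := ∀ (graph : List (Int × List Int)),
  Dom_findMaxLeafTree graph → Pre_findMaxLeafTree graph →
    Spec_findMaxLeafTree graph (findMaxLeafTree graph)

def Claim_raises_findMaxLeafTree : Prop :=
  (∀ (graph : List (Int × List Int)), Dom_findMaxLeafTree graph →
      Raises_findMaxLeafTree graph → ¬ Pre_findMaxLeafTree graph) ∧
  (Dom_findMaxLeafTree (pvRaiseWitness_findMaxLeafTree) ∧
    Raises_findMaxLeafTree (pvRaiseWitness_findMaxLeafTree) ∧
    findMaxLeafTree_alt (pvRaiseWitness_findMaxLeafTree) = pvRaiseWitnessOut_findMaxLeafTree)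

-- ===== LEMMAS AND PROOFS =====

theorem remove_getD_eq_discard (l : List Int) (a : Int) (h : l.Nodup) (hm : l.contains a) :
    (PySem.List.remove? l a).getD l = PySem.Set.discard l a := by
  have hmem : a ∈ l := by simpa using hm
  rw [PySem.List.remove?_eq_some_erase l a hmem, Option.getD_some,
    List.Nodup.erase_eq_filter h a]
  rfl

theorem remove_getD_sublist (l : List Int) (a : Int) :
    ((PySem.List.remove? l a).getD l).Sublist l := by
  by_cases hm : a ∈ l
  · rw [PySem.List.remove?_eq_some_erase l a hm, Option.getD_some]
    exact List.erase_sublist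
  · rw [(PySem.List.remove?_eq_none_iff l a).mpr hm, Option.getD_none]

theorem pvBody_eq (x : Int) (st : PySem.Dict Int (List Int) × List Int) (y : Int)
    (h : st.2.Nodup) : pvBodyA x st y = pvBodyB x st y := by
  obtain ⟨ng, vs⟩ := st
  simp only [pvBodyA, pvBodyB, PySem.Set.contains] at *
  by_cases hy : vs.contains y
  · have hnd2 : (PySem.Set.discard vs y).Nodup := List.Nodup.filter _ h
    have hy' : y ∈ vs := by simpa using hy
    by_cases hx : (PySem.Set.discard vs y).contains x
    · have hx' : x ∈ PySem.Set.discard vs y := by simpa using hx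
      simp [hy', hx', remove_getD_eq_discard vs y h hy, remove_getD_eq_discard _ x hnd2 hx,
        PySem.Set.remove?, hx]
    · have hx' : x ∉ PySem.Set.discard vs y := by simpa using hx
      simp [hy', hx', remove_getD_eq_discard vs y h hy]
  · have hy' : y ∉ vs := by simpa using hy
    by_cases hx : vs.contains x
    · have hx' : x ∈ vs := by simpa using hx
      simp [hy', hx', remove_getD_eq_discard vs x h hx, PySem.Set.remove?, hx]
    · have hx' : x ∉ vs := by simpa using hx
      simp [hy', hx']

theorem pvBody_sublist (x : Int) (st : PySem.Dict Int (List Int) × List Int) (y : Int) :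
    (pvBodyA x st y).2.Sublist st.2 := by
  obtain ⟨ng, vs⟩ := st
  simp only [pvBodyA]
  have step2 : ∀ (p : PySem.Dict Int (List Int) × List Int), p.2.Sublist vs →
      ((if p.2.contains x then (p.1, (PySem.List.remove? p.2 x).getD p.2) else p).2).Sublist vs := by
    intro p hp
    split
    · exact (remove_getD_sublist _ _).trans hp
    · exact hp
  apply step2
  split
  · exact remove_getD_sublist vs y
  · exact List.Sublist.refl vs

theorem pvFoldBody_eq (x : Int) (l : List Int) (st : PySem.Dict Int (List Int) × List Int)
    (h : st.2.Nodup) :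
    l.foldl (pvBodyA x) st = l.foldl (pvBodyB x) st ∧
      (l.foldl (pvBodyA x) st).2.Sublist st.2 := by
  induction l generalizing st with
  | nil => exact ⟨rfl, List.Sublist.refl _⟩
  | cons y t ih =>
    have hsub : (pvBodyA x st y).2.Sublist st.2 := pvBody_sublist x st y
    have hnd : (pvBodyA x st y).2.Nodup := List.Nodup.sublist hsub h
    obtain ⟨he, hs⟩ := ih (pvBodyA x st y) hnd
    refine ⟨?_, hs.trans hsub⟩
    simp only [List.foldl_cons]
    rw [he]
    rw [pvBody_eq x st y h]

theorem pvStep_eq (graph : List (Int × List Int)) (st : PySem.Dict Int (List Int) × List Int)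
    (x : Int) (h : st.2.Nodup) :
    pvStepA graph st x = pvStepB graph st x ∧ (pvStepA graph st x).2.Sublist st.2 := by
  have := pvFoldBody_eq x (pvAdj graph x) st h
  exact ⟨by rw [pvStepA, this.1]; rfl, this.2⟩

theorem pvFold_eq (graph : List (Int × List Int)) (l : List Int)
    (st : PySem.Dict Int (List Int) × List Int) (h : st.2.Nodup) :
    l.foldl (fun st x => pvStepA graph st x) st = l.foldl (fun st x => pvStepB graph st x) st := by
  induction l generalizing st with
  | nil => rfl
  | cons x t ih =>
    obtain ⟨he, hs⟩ := pvStep_eq graph st x h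
    simp only [List.foldl_cons]
    rw [← he, ih _ (List.Nodup.sublist hs h)]

theorem pvBodyA_nil (x : Int) (ng : PySem.Dict Int (List Int)) (y : Int) :
    pvBodyA x (ng, []) y = (ng, []) := by
  simp [pvBodyA]

theorem pvStepA_nil (graph : List (Int × List Int)) (ng : PySem.Dict Int (List Int)) (x : Int) :
    pvStepA graph (ng, []) x = (ng, []) := by
  rw [pvStepA]
  induction pvAdj graph x with
  | nil => rfl
  | cons y t ih => rw [List.foldl_cons, pvBodyA_nil, ih]

theorem pvFoldA_nil (graph : List (Int × List Int)) (l : List Int)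
    (ng : PySem.Dict Int (List Int)) :
    l.foldl (fun st x => pvStepA graph st x) (ng, []) = (ng, []) := by
  induction l with
  | nil => rfl
  | cons x t ih => rw [List.foldl_cons, pvStepA_nil, ih]

theorem pvPairwise_gt_of_ge (l : List Int) (hnd : l.Nodup)
    (h : l.Pairwise (fun a b => b ≤ a)) : l.Pairwise (fun a b => b < a) :=
  (hnd.and h).imp (fun ⟨hne, hle⟩ => lt_of_le_of_ne hle (Ne.symm hne))

theorem pvSortedDesc_cons (ks : List Int) (m : Int) (hnd : ks.Nodup)
    (hmax : PySem.List.max? ks (fun k => k) = some m) :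
    PySem.List.sorted ks (fun k => k) true
      = m :: PySem.List.sorted (ks.erase m) (fun k => k) true := by
  have hm : m ∈ ks := PySem.List.max?_mem hmax
  apply PySem.List.sorted_rev_eq_of_perm_of_pairwise_gt
  · exact ((PySem.List.sorted_perm (ks.erase m) (fun k => k) true).cons m).trans
      (List.perm_cons_erase hm).symm
  · constructor
    · intro b hb
      have hb' : b ∈ ks.erase m := by
        simpa [PySem.List.mem_sorted] using hb
      have hbk : b ∈ ks := List.mem_of_mem_erase hb'
      have hne : b ≠ m := (List.Nodup.mem_erase_iff hnd).mp hb' |>.1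
      exact lt_of_le_of_ne (PySem.List.max?_isMax hmax b hbk) hne
    · apply pvPairwise_gt_of_ge
      · exact (PySem.List.sorted_perm (ks.erase m) (fun k => k) true).nodup_iff.mpr
          (hnd.erase m)
      · exact PySem.List.sorted_pairwise_rev (ks.erase m) (fun k => k)

theorem pvKeys_erase (d : PySem.Dict Int (List Int)) (m : Int) (hnd : d.keys.Nodup) :
    (d.erase m).keys = d.keys.erase m := by
  rw [List.Nodup.erase_eq_filter hnd m]
  simp only [PySem.Dict.erase, PySem.Dict.keys, List.filter_map]
  rfl

theorem pvFind_filter_ne (m k : Int) (h : k ≠ m) (t : List (Int × List Int)) :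
    List.find? (fun p => p.1 == k) (t.filter (fun p => !(p.1 == m)))
      = List.find? (fun p => p.1 == k) t := by
  induction t with
  | nil => rfl
  | cons p t ih =>
    rw [List.filter_cons, List.find?_cons]
    by_cases hm : p.1 = m
    · have h1 : (!(p.1 == m)) = false := by simp [hm]
      have h2 : (p.1 == k) = false := by
        simp only [beq_eq_false_iff_ne, ne_eq]
        rintro rfl; exact h hm
      rw [h1, if_neg (by simp), h2]
      simpa using ih
    · have h1 : (!(p.1 == m)) = true := by simp [hm]
      rw [h1, if_pos rfl, List.find?_cons]
      by_cases hk : p.1 = k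
      · simp [hk]
      · have hk' : (p.1 == k) = false := by simp [hk]
        rw [hk']
        simpa using ih

theorem pvGetD_erase_of_ne (d : PySem.Dict Int (List Int)) (m k : Int) (h : k ≠ m) :
    (d.erase m).getD k [] = d.getD k [] := by
  simp only [PySem.Dict.getD, PySem.Dict.get?, PySem.Dict.erase,
    pvFind_filter_ne m k h d.items]

-- A's while/max/del loop is the fold of the inner pass over the buckets in descending key order
theorem pvLoopA_eq (graph : List (Int × List Int)) (buckets : PySem.Dict Int (List Int))
    (ng : PySem.Dict Int (List Int)) (vs : List Int) (hnd : buckets.keys.Nodup) :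
    pvLoopA graph buckets ng vs =
      (((PySem.List.sorted buckets.keys (fun k => k) true).flatMap
          (fun d => buckets.getD d [])).foldl (fun st x => pvStepA graph st x) (ng, vs)).1 := by
  generalize hn : buckets.items.length = n
  induction n using Nat.strong_induction_on generalizing buckets ng vs with
  | _ n ih =>
  rw [pvLoopA]
  by_cases hvs : vs.isEmpty
  · rw [if_pos hvs]
    have : vs = [] := by simpa [List.isEmpty_iff] using hvs
    subst this
    rw [pvFoldA_nil]
  · rw [if_neg hvs]
    split
    next hmax =>
      have hk : buckets.keys = [] := (PySem.List.max?_eq_none_iff _ _).mp hmax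
      simp [hk, PySem.List.sorted]
    next m hmax =>
      have hm : m ∈ buckets.keys := PySem.List.max?_mem hmax
      have hlt : (buckets.erase m).items.length < n := by
        subst hn
        simp only [PySem.Dict.keys, List.mem_map] at hm
        obtain ⟨p, hp, hpm⟩ := hm
        simp only [PySem.Dict.erase]
        exact List.length_filter_lt_length_iff_exists.mpr ⟨p, hp, by simp [hpm]⟩
      have hnd' : (buckets.erase m).keys.Nodup := by
        rw [pvKeys_erase buckets m hnd]; exact hnd.erase m
      rw [ih _ hlt _ _ _ hnd' rfl]
      rw [pvSortedDesc_cons buckets.keys m hnd hmax, List.flatMap_cons, List.foldl_append]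
      rw [pvKeys_erase buckets m hnd]
      have hmap : (PySem.List.sorted (buckets.keys.erase m) (fun k => k) true).flatMap
            (fun d => (buckets.erase m).getD d [])
          = (PySem.List.sorted (buckets.keys.erase m) (fun k => k) true).flatMap
            (fun d => buckets.getD d []) := by
        unfold List.flatMap
        refine congrArg List.flatten (List.map_congr_left ?_)
        intro d hd
        have hdm : d ≠ m := by
          have := (List.Nodup.mem_erase_iff hnd).mp
            (by simpa [PySem.List.mem_sorted] using hd)
          exact this.1
        exact pvGetD_erase_of_ne buckets m d hdm
      rw [hmap]

-- the bucket dict characterized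
theorem pvInsert_modify (d : PySem.Dict Int (List Int)) (n : Int) (f : List Int → List Int) :
    (if d.contains n then d else d.insert n []).modify n [] f = d.modify n [] f := by
  by_cases h : d.contains n
  · rw [if_pos h]
  · rw [if_neg h]
    simp only [PySem.Dict.modify]
    rw [PySem.Dict.getD_insert_self, PySem.Dict.insert_insert_self,
      PySem.Dict.getD_of_not_contains d [] (by simpa using h)]

theorem pvBucketsA_eq_modify (graph : List (Int × List Int)) :
    pvBucketsA graph = (graph.map Prod.fst).foldl
      (fun d x => d.modify (pvDeg graph x) [] (fun l => l ++ [x])) PySem.Dict.empty := by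
  unfold pvBucketsA
  congr 1
  funext d x
  exact pvInsert_modify d (pvDeg graph x) (fun l => l ++ [x])

theorem pvBucketsA_getD (graph : List (Int × List Int)) (c : Int) :
    (pvBucketsA graph).getD c [] = (graph.map Prod.fst).filter (fun x => pvDeg graph x == c) := by
  rw [pvBucketsA_eq_modify]
  have : (graph.map Prod.fst).foldl
        (fun d x => d.modify (pvDeg graph x) [] (fun l => l ++ [x])) PySem.Dict.empty
      = ((graph.map Prod.fst).map (fun x => (pvDeg graph x, x))).foldl
        (fun d p => d.modify p.1 [] (fun l => l ++ [p.2])) PySem.Dict.empty := by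
    exact (List.foldl_map (f := fun x => (pvDeg graph x, x))
      (g := fun d p => d.modify p.1 [] (fun l => l ++ [p.2]))
      (l := graph.map Prod.fst) (init := PySem.Dict.empty)).symm
  rw [this, PySem.Dict.getD_foldl_modify_append]
  simp [List.filter_map, Function.comp_def]

theorem pvBucketsA_keys (graph : List (Int × List Int)) :
    (pvBucketsA graph).keys = PySem.Set.ofList ((graph.map Prod.fst).map (pvDeg graph)) := by
  rw [pvBucketsA_eq_modify]
  rw [PySem.Dict.keys_foldl_modify_key (graph.map Prod.fst) (fun x => pvDeg graph x) []
    (fun _ x => fun l => l ++ [x]) PySem.Dict.empty]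
  rfl

-- insertBy positioning lemmas
theorem pvInsertBy_append_left (before : Int → Int → Bool) (x : Int) (P Q : List Int)
    (h : ∀ y ∈ P, before x y = false) :
    PySem.List.insertBy before x (P ++ Q) = P ++ PySem.List.insertBy before x Q := by
  induction P with
  | nil => rfl
  | cons p t ih =>
    have hp : before x p = false := h p (by simp)
    simp only [List.cons_append, PySem.List.insertBy, hp, Bool.false_eq_true, if_false]
    rw [ih (fun y hy => h y (by simp [hy]))]

theorem pvInsertBy_all_before (before : Int → Int → Bool) (x : Int) (ys : List Int)
    (h : ∀ y ∈ ys, before x y = true) :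
    PySem.List.insertBy before x ys = x :: ys := by
  cases ys with
  | nil => rfl
  | cons y t => simp [PySem.List.insertBy, h y (by simp)]

-- strictly descending distinct-key lists
theorem pvSortedDesc_strict (s : List Int) (hnd : s.Nodup) :
    (PySem.List.sorted s (fun d => d) true).Pairwise (fun a b => b < a) :=
  pvPairwise_gt_of_ge _ ((PySem.List.sorted_perm s (fun d => d) true).nodup_iff.mpr hnd)
    (PySem.List.sorted_pairwise_rev s (fun d => d))

-- inserting an element whose key is already a block: it lands at the end of its block
theorem pvInsertBy_flatMap_mem (f : Int → Int) (vs : List Int) (x : Int) (D : List Int)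
    (hD : D.Pairwise (fun a b => b < a)) (hx : f x ∈ D) :
    PySem.List.insertBy (fun a b => decide (f b < f a)) x
        (D.flatMap (fun d => vs.filter (fun z => f z == d)))
      = D.flatMap (fun d => vs.filter (fun z => f z == d) ++ if f x == d then [x] else []) := by
  induction D with
  | nil => cases hx
  | cons d D' ih =>
    rw [List.pairwise_cons] at hD
    obtain ⟨hd, hD'⟩ := hD
    simp only [List.flatMap_cons]
    have hblkmem : ∀ c, ∀ y ∈ vs.filter (fun z => f z == c), f y = c := by
      intro c y hy
      simpa using (List.mem_filter.mp hy).2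
    by_cases hfx : f x = d
    · have h1 : ∀ y ∈ vs.filter (fun z => f z == d),
          (fun a b => decide (f b < f a)) x y = false := by
        intro y hy
        simp [hblkmem d y hy, hfx]
      rw [pvInsertBy_append_left _ _ _ _ h1]
      have h2 : ∀ y ∈ D'.flatMap (fun c => vs.filter (fun z => f z == c)),
          (fun a b => decide (f b < f a)) x y = true := by
        intro y hy
        obtain ⟨c, hc, hyc⟩ := List.mem_flatMap.mp hy
        have : f y = c := hblkmem c y hyc
        simp [this, hfx]
        exact hd c hc
      rw [pvInsertBy_all_before _ _ _ h2]
      have h3 : D'.flatMap (fun c => vs.filter (fun z => f z == c) ++ if f x == c then [x] else [])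
          = D'.flatMap (fun c => vs.filter (fun z => f z == c)) := by
        unfold List.flatMap
        refine congrArg List.flatten (List.map_congr_left ?_)
        intro c hc
        have : f x ≠ c := by rw [hfx]; exact ne_of_gt (hd c hc)
        simp [this]
      rw [h3, if_pos (by simp [hfx])]
      simp
    · have hx' : f x ∈ D' := by
        rcases hx with _ | h
        · exact absurd rfl hfx
        · assumption
      have hxlt : f x < d := hd (f x) hx'
      have h1 : ∀ y ∈ vs.filter (fun z => f z == d),
          (fun a b => decide (f b < f a)) x y = false := by
        intro y hy
        have := hblkmem d y hy
        simp only [decide_eq_false_iff_not, not_lt, this]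
        exact le_of_lt hxlt
      rw [pvInsertBy_append_left _ _ _ _ h1, ih hD' hx', if_neg (by simpa using hfx)]
      simp

-- inserting an element with a fresh key: a new one-element block appears in key position
theorem pvInsertBy_flatMap_fresh (f : Int → Int) (vs : List Int) (x : Int) (D : List Int)
    (hD : D.Pairwise (fun a b => b < a)) (hx : f x ∉ D)
    (hblk : vs.filter (fun z => f z == f x) = []) :
    PySem.List.insertBy (fun a b => decide (f b < f a)) x
        (D.flatMap (fun d => vs.filter (fun z => f z == d)))
      = (PySem.List.insertBy (fun a b => decide (b < a)) (f x) D).flatMap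
          (fun d => vs.filter (fun z => f z == d) ++ if f x == d then [x] else []) := by
  induction D with
  | nil => simp [PySem.List.insertBy, hblk]
  | cons d D' ih =>
    rw [List.pairwise_cons] at hD
    obtain ⟨hd, hD'⟩ := hD
    have hblkmem : ∀ c, ∀ y ∈ vs.filter (fun z => f z == c), f y = c := by
      intro c y hy
      simpa using (List.mem_filter.mp hy).2
    have hfxd : f x ≠ d := by intro hh; exact hx (by simp [hh])
    by_cases hlt : d < f x
    · have hins : PySem.List.insertBy (fun a b => decide (b < a)) (f x) (d :: D')
          = f x :: d :: D' := by
        simp [PySem.List.insertBy, hlt]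
      rw [hins]
      have hall : ∀ y ∈ (d :: D').flatMap (fun c => vs.filter (fun z => f z == c)),
          (fun a b => decide (f b < f a)) x y = true := by
        intro y hy
        obtain ⟨c, hc, hyc⟩ := List.mem_flatMap.mp hy
        have hyc' : f y = c := hblkmem c y hyc
        have : c ≤ d := by
          rcases List.mem_cons.mp hc with rfl | hc'
          · exact le_refl c
          · exact le_of_lt (hd c hc')
        simp only [decide_eq_true_iff, hyc']
        exact lt_of_le_of_lt this hlt
      rw [pvInsertBy_all_before _ _ _ hall]
      have h3 : D'.flatMap (fun c => vs.filter (fun z => f z == c) ++ if f x == c then [x] else [])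
          = D'.flatMap (fun c => vs.filter (fun z => f z == c)) := by
        unfold List.flatMap
        refine congrArg List.flatten (List.map_congr_left ?_)
        intro c hc
        have : f x ≠ c := ne_of_gt (lt_trans (hd c hc) hlt)
        simp [this]
      simp only [List.flatMap_cons]
      rw [h3]
      simp [hblk, hfxd]
    · have hdx : f x < d := lt_of_le_of_ne (not_lt.mp hlt) hfxd
      have hins : PySem.List.insertBy (fun a b => decide (b < a)) (f x) (d :: D')
          = d :: PySem.List.insertBy (fun a b => decide (b < a)) (f x) D' := by
        simp [PySem.List.insertBy, not_lt.mp hlt, hlt]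
      rw [hins, List.flatMap_cons, List.flatMap_cons]
      have h1 : ∀ y ∈ vs.filter (fun z => f z == d),
          (fun a b => decide (f b < f a)) x y = false := by
        intro y hy
        simp [hblkmem d y hy]
        exact le_of_lt hdx
      rw [pvInsertBy_append_left _ _ _ _ h1,
        ih hD' (fun hh => hx (by simp [hh])), if_neg (by simpa using hfxd)]
      simp

-- stable sort by descending f = concatenation of the f-fibre blocks in descending f order
theorem pvSortBlocks (vs : List Int) (f : Int → Int) :
    PySem.List.sorted vs (fun x => -(f x)) =
      (PySem.List.sorted (PySem.Set.ofList (vs.map f)) (fun d => d) true).flatMap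
        (fun d => vs.filter (fun x => f x == d)) := by
  induction vs using List.reverseRecOn with
  | nil => rfl
  | append_singleton vs x ih =>
    have hbef : (fun a b => decide ((fun x => -(f x)) a < (fun x => -(f x)) b))
        = (fun a b => decide (f b < f a)) := by
      funext a b
      simp [Int.neg_lt_neg_iff]
    have hstep : PySem.List.sorted (vs ++ [x]) (fun x => -(f x))
        = PySem.List.insertBy (fun a b => decide (f b < f a)) x
            (PySem.List.sorted vs (fun x => -(f x))) := by
      rw [PySem.List.sorted_eq_foldl_insertBy (vs ++ [x]) (fun x => -(f x)),
        List.foldl_append, ← PySem.List.sorted_eq_foldl_insertBy vs (fun x => -(f x))]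
      simp only [List.foldl_cons, List.foldl_nil, hbef]
    have hset : PySem.Set.ofList ((vs ++ [x]).map f)
        = (PySem.Set.ofList (vs.map f)).add (f x) := by
      rw [List.map_append, List.map_cons, List.map_nil, PySem.Set.ofList_append_singleton]
    have hfilters : ∀ c : Int, (vs ++ [x]).filter (fun z => f z == c)
        = vs.filter (fun z => f z == c) ++ if f x == c then [x] else [] := by
      intro c
      rw [List.filter_append]
      congr 1
      cases h : (f x == c) <;> simp [List.filter_cons, h]
    have hstrict := pvSortedDesc_strict (PySem.Set.ofList (vs.map f))
      (PySem.Set.nodup_ofList (vs.map f))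
    rw [hstep, ih]
    by_cases hmem : f x ∈ PySem.Set.ofList (vs.map f)
    · rw [hset, PySem.Set.add_of_mem hmem]
      have hxD : f x ∈ PySem.List.sorted (PySem.Set.ofList (vs.map f)) (fun d => d) true := by
        rw [PySem.List.mem_sorted]
        exact hmem
      rw [pvInsertBy_flatMap_mem f vs x _ hstrict hxD]
      unfold List.flatMap
      refine congrArg List.flatten (List.map_congr_left ?_)
      intro c _
      rw [hfilters c]
    · rw [hset, PySem.Set.add_of_not_mem hmem]
      have hblk : vs.filter (fun z => f z == f x) = [] := by
        rw [List.filter_eq_nil_iff]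
        intro z hz hzf
        exact hmem (by
          rw [PySem.Set.mem_ofList]
          exact (by simpa using hzf : f z = f x) ▸ List.mem_map_of_mem hz)
      have hD' : PySem.List.sorted (PySem.Set.ofList (vs.map f) ++ [f x]) (fun d => d) true
          = PySem.List.insertBy (fun a b => decide (b < a)) (f x)
              (PySem.List.sorted (PySem.Set.ofList (vs.map f)) (fun d => d) true) := by
        rw [PySem.List.sorted_rev_eq_foldl_insertBy (PySem.Set.ofList (vs.map f) ++ [f x])
            (fun d => d),
          List.foldl_append, ← PySem.List.sorted_rev_eq_foldl_insertBy]
        simp only [List.foldl_cons, List.foldl_nil]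
      rw [hD', pvInsertBy_flatMap_fresh f vs x _ hstrict
          (fun hh => hmem ((PySem.List.mem_sorted _ _ _ _).mp hh)) hblk]
      unfold List.flatMap
      refine congrArg List.flatten (List.map_congr_left ?_)
      intro c _
      rw [hfilters c]

-- ===== VERDICT (by name: the statement is the Claim_ definition above) =====
theorem findMaxLeafTree_spec : Claim_equal_findMaxLeafTree := by
  intro graph _ hpre
  obtain ⟨hnd, -⟩ := hpre
  unfold Spec_findMaxLeafTree findMaxLeafTree findMaxLeafTree_alt
  simp only []
  have hkeysnd : (pvBucketsA graph).keys.Nodup := by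
    rw [pvBucketsA_keys]
    exact PySem.Set.nodup_ofList _
  rw [pvLoopA_eq graph (pvBucketsA graph) PySem.Dict.empty (graph.map Prod.fst) hkeysnd]
  have hLA : (PySem.List.sorted (pvBucketsA graph).keys (fun k => k) true).flatMap
        (fun d => (pvBucketsA graph).getD d [])
      = PySem.List.sorted (graph.map Prod.fst) (fun x => -(pvDeg graph x)) := by
    rw [pvBucketsA_keys, pvSortBlocks (graph.map Prod.fst) (pvDeg graph)]
    unfold List.flatMap
    refine congrArg List.flatten (List.map_congr_left ?_)
    intro c _
    exact pvBucketsA_getD graph c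
  rw [hLA, pvFold_eq graph _ (PySem.Dict.empty, graph.map Prod.fst) hnd,
    PySem.Set.ofList_eq_self_of_nodup _ hnd]

theorem findMaxLeafTree_raises : Claim_raises_findMaxLeafTree := by
  unfold Claim_raises_findMaxLeafTree
  constructor
  · rintro graph - ⟨hnd, p, hp, hemp, hnotin⟩ ⟨-, hall⟩
    rcases hall p hp with h | h
    · exact h hemp
    · exact hnotin h
  · exact ⟨by decide, by decide, by decide⟩

-- self-check: the raise witness really lies outside Pre_ (a consequence of findMaxLeafTree_raises)
theorem pvRaiseWitness_ok : ¬ Pre_findMaxLeafTree pvRaiseWitness_findMaxLeafTree :=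
  findMaxLeafTree_raises.1 pvRaiseWitness_findMaxLeafTree
    findMaxLeafTree_raises.2.1 findMaxLeafTree_raises.2.2.1
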